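-- pv_equiv track=rewrite | github.com/chris-henry-holland/python-ProjectEulerSolutions | venv/lib/python3.11/site-packages/algorithms/graph_algorithms.py | hierholzerAlgorithm
-- ===== SOURCE A (Python) =====
-- from typing import (
--     Any,
--     Hashable,
--     Dict,
--     List,
--     Set,
--     Tuple,
--     Optional,
--     Union,
--     Generator,
--     Callable,
-- )
--
-- def hierholzerAlgorithm(
--     edges: List[list],
--     start=None,
--     sort: bool=False,
--     reverse: bool=False
-- ) -> List[int]:
--     """
--     Finding an Eulerian path for a digraph using Hierholzer's algorithm.
--     If none exists, returns empty list
--     Can be used to solve Leetcode #332, #2097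
--     """
--     out_edges = {}
--     degrees = {}
--     for e in edges:
--         out_edges.setdefault(e[0], [])
--         out_edges.setdefault(e[1], [])
--         out_edges[e[0]].append(e[1])
--         degrees[e[0]] = degrees.get(e[0], 0) + 1
--         degrees[e[1]] = degrees.get(e[1], 0) - 1
--     if start not in degrees.keys(): return []
--     # Checking if Eulerian path exists, and whether (if start is given)
--     # and Eulerian path can start at start.
--     nonzero_degree = {}
--     for v, d in degrees.items():
--         if not d: continue
--         elif abs(d) != 1 or d in nonzero_degree.keys(): return []
--         nonzero_degree[d] = v
--     if nonzero_degree: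
--         if start is not None and nonzero_degree[1] != start: return []
--         start = nonzero_degree[1]
--     elif start is None:
--         start = next(iter(degrees.keys()))
--     if sort:
--         for v in out_edges.keys():
--             out_edges[v].sort(reverse=not reverse)
--
--     res = []
--     def dfs(v: int) -> List[int]:
--         while out_edges[v]:
--             v2 = out_edges[v].pop()
--             dfs(v2)
--         res.append(v)
--         return
--
--     dfs(start)
--     if len(res) != len(edges) + 1: return []
--     return res[::-1]
-- ===== SOURCE B (Python) =====
-- def hierholzerAlgorithm(edges, start=None, sort=False, reverse=False):
--     out_edges = {}
--     degrees = {}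
--     for e in edges:
--         out_edges.setdefault(e[0], [])
--         out_edges.setdefault(e[1], [])
--         out_edges[e[0]].append(e[1])
--         degrees[e[0]] = degrees.get(e[0], 0) + 1
--         degrees[e[1]] = degrees.get(e[1], 0) - 1
--     if start not in degrees:
--         return []
--     plus = [v for v, d in degrees.items() if d == 1]
--     minus = [v for v, d in degrees.items() if d == -1]
--     if any(abs(d) > 1 for d in degrees.values()) or len(plus) > 1 or len(minus) > 1:
--         return []
--     if (plus or minus) and (len(plus) != 1 or plus[0] != start):
--         return []
--     if sort:
--         for v in out_edges:
--             out_edges[v].sort(reverse=not reverse)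
--     stack = [start]
--     res = []
--     while stack:
--         v = stack[-1]
--         if out_edges[v]:
--             stack.append(out_edges[v].pop())
--         else:
--             res.append(stack.pop())
--     if len(res) != len(edges) + 1:
--         return []
--     res.reverse()
--     return res
-- ===== Notes on version B (the rewrite author's own statement) =====
-- stated objective: alternative
-- what changed: The recursive dfs of Hierholzer's algorithm is replaced by an explicit-stack iterative loop (peek top, push a popped out-edge, else emit and pop), and the degree-parity validation via the nonzero_degree dict with early returns is replaced by filter/any checks on the degree table; Pre_ only excludes edge records shorter than 2 entries, on which A raises IndexError.
import Mathlib
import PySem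

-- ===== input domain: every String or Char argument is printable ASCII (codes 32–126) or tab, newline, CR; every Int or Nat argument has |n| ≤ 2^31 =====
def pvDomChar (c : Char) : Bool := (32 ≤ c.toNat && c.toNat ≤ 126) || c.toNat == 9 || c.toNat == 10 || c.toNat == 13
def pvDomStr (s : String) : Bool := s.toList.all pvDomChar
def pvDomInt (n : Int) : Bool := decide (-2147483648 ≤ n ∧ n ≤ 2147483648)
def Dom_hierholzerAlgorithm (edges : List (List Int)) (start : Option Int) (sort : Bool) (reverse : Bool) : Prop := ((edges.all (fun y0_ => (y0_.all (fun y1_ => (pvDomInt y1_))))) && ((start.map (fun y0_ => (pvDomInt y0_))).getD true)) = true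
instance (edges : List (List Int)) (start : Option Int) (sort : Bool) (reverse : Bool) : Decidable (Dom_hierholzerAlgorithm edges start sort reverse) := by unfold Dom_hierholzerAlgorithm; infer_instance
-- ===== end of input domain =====

-- B is an explicit-stack iterative Hierholzer with filter-based degree validation; A is the
-- recursive original. Equivalence is about the return value (A and B read their inputs only).
-- Note both A and B return [] whenever start is None (A's `start not in degrees` check fires).

-- ===== PORT A =====
-- shared preprocessing: the Python loop building out_edges/degrees is textually identical in A and B
def pvBuild (edges : List (List Int)) : PySem.Dict Int (List Int) × PySem.Dict Int Int :=
  edges.foldl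
    (fun st e =>
      let a := PySem.List.pyGetD e 0 0
      let b := PySem.List.pyGetD e 1 0
      let oe := ((st.1.setdefault a []).setdefault b []).modify a [] (fun l => l ++ [b])
      let dg := st.2.insert a (st.2.getD a 0 + 1)
      (oe, dg.insert b (dg.getD b 0 - 1)))
    (PySem.Dict.mk [], PySem.Dict.mk [])

-- shared: the `if sort:` loop sorting each adjacency list, identical in A and B
def pvSortAll (oe : PySem.Dict Int (List Int)) (reverse : Bool) : PySem.Dict Int (List Int) :=
  oe.keys.foldl (fun d v => d.modify v [] (fun l => PySem.List.sorted l id (!reverse))) oe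

-- total number of stored out-edges; used only as the fuel bound of the two loops
def pvSize (d : PySem.Dict Int (List Int)) : Nat :=
  (d.items.map (fun p => p.2.length)).sum

-- A's validation loop over degrees.items building nonzero_degree (none = the early `return []`)
def pvChk : List (Int × Int) → PySem.Dict Int Int → Option (PySem.Dict Int Int)
  | [], nz => some nz
  | (v, d) :: rest, nz =>
    if d = 0 then pvChk rest nz
    else if d.natAbs ≠ 1 ∨ nz.contains d then none
    else pvChk rest (nz.insert d v)

-- A's recursive dfs; fuel 2*pvSize+1 bounds the call-chain depth (each level pops an edge or is terminal)
def pvDfsA : Nat → PySem.Dict Int (List Int) → List Int → Int → Option (PySem.Dict Int (List Int) × List Int)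
  | 0, _, _, _ => none
  | f + 1, oe, res, v =>
    let l := oe.getD v []
    if hl : l = [] then some (oe, res ++ [v])
    else
      match pvDfsA f (oe.insert v l.dropLast) res (l.getLast hl) with
      | none => none
      | some (oe2, res2) => pvDfsA f oe2 res2 v

def pvRunA (edges : List (List Int)) (oe : PySem.Dict Int (List Int)) (s : Int) : List Int :=
  match pvDfsA (2 * pvSize oe + 1) oe [] s with
  | none => []  -- unreachable: the fuel suffices (pvDfsA_isSome below)
  | some (_, res) => if res.length ≠ edges.length + 1 then [] else res.reverse

def hierholzerAlgorithm (edges : List (List Int)) (start : Option Int) (sort : Bool) (reverse : Bool) : List Int :=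
  let bd := pvBuild edges
  let oe := bd.1
  let dg := bd.2
  match start with
  | none => []  -- `start not in degrees.keys()`: None is never a key
  | some s =>
    if dg.contains s = false then []
    else
      match pvChk dg.items (PySem.Dict.mk []) with
      | none => []
      | some nz =>
        if nz.items.isEmpty = false then
          match nz.get? 1 with
          | none => []  -- Python's nonzero_degree[1]: since degrees sum to 0 this branch is never reached
          | some t =>
            if t ≠ s then []
            else pvRunA edges (if sort then pvSortAll oe reverse else oe) s
        else pvRunA edges (if sort then pvSortAll oe reverse else oe) s

-- ===== PORT B =====
-- B's iterative Hierholzer loop: peek the stack top; push a popped out-edge, else emit and pop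
def pvLoopB : Nat → PySem.Dict Int (List Int) → List Int → List Int → Option (List Int)
  | _, _, [], res => some res
  | 0, _, _ :: _, _ => none
  | f + 1, oe, v :: st, res =>
    let l := oe.getD v []
    if hl : l = [] then pvLoopB f oe st (res ++ [v])
    else pvLoopB f (oe.insert v l.dropLast) (l.getLast hl :: v :: st) res

def pvRunB (edges : List (List Int)) (oe : PySem.Dict Int (List Int)) (s : Int) : List Int :=
  match pvLoopB (2 * pvSize oe + 1) oe [s] [] with
  | none => []  -- unreachable: the fuel suffices
  | some res => if res.length ≠ edges.length + 1 then [] else res.reverse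

def hierholzerAlgorithm_alt (edges : List (List Int)) (start : Option Int) (sort : Bool) (reverse : Bool) : List Int :=
  let bd := pvBuild edges
  let oe := bd.1
  let dg := bd.2
  match start with
  | none => []
  | some s =>
    if dg.contains s = false then []
    else
      let plus := (dg.items.filter (fun p => p.2 == 1)).map Prod.fst
      let minus := (dg.items.filter (fun p => p.2 == -1)).map Prod.fst
      if dg.values.any (fun d => 1 < d.natAbs) || 1 < plus.length || 1 < minus.length then []
      else if (!plus.isEmpty || !minus.isEmpty) && (plus.length ≠ 1 || PySem.List.pyGetD plus 0 0 ≠ s) then []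
      else pvRunB edges (if sort then pvSortAll oe reverse else oe) s

-- ===== PRECONDITION & SPEC =====
-- Pre_ excludes edge records with fewer than 2 entries, on which A raises IndexError at e[0]/e[1]
def Pre_hierholzerAlgorithm (edges : List (List Int)) (start : Option Int) (sort : Bool) (reverse : Bool) : Prop :=
  ∀ e ∈ edges, 2 ≤ e.length
instance (edges : List (List Int)) (start : Option Int) (sort : Bool) (reverse : Bool) : Decidable (Pre_hierholzerAlgorithm edges start sort reverse) := by unfold Pre_hierholzerAlgorithm; infer_instance
def pvWitness_hierholzerAlgorithm : List (List Int) × Option Int × Bool × Bool := ([[0, 1], [1, 0]], some 0, false, false)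

def Spec_hierholzerAlgorithm (edges : List (List Int)) (start : Option Int) (sort : Bool) (reverse : Bool) (out : List Int) : Prop := out = hierholzerAlgorithm_alt edges start sort reverse
instance (edges : List (List Int)) (start : Option Int) (sort : Bool) (reverse : Bool) (out : List Int) : Decidable (Spec_hierholzerAlgorithm edges start sort reverse out) := by unfold Spec_hierholzerAlgorithm; infer_instance

-- ===== CLAIM (what is proved, stated in full; the proofs are below) =====
def Claim_equal_hierholzerAlgorithm : Prop := ∀ (edges : List (List Int)) (start : Option Int) (sort : Bool) (reverse : Bool), Dom_hierholzerAlgorithm edges start sort reverse → Pre_hierholzerAlgorithm edges start sort reverse → Spec_hierholzerAlgorithm edges start sort reverse (hierholzerAlgorithm edges start sort reverse)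

-- ===== LEMMAS AND PROOFS =====

lemma pv_nodup_setdefault (d : PySem.Dict Int (List Int)) (k : Int) (v : List Int)
    (h : d.keys.Nodup) : (d.setdefault k v).keys.Nodup := by
  by_cases hc : d.contains k = true
  · rw [PySem.Dict.setdefault_of_contains d v hc]; exact h
  · rw [PySem.Dict.setdefault_of_not_contains d v (by simpa using hc)]
    exact PySem.Dict.nodup_keys_insert _ _ _ h
lemma pv_nodup_modify (d : PySem.Dict Int (List Int)) (k : Int) (d0 : List Int) (f : List Int → List Int)
    (h : d.keys.Nodup) : (d.modify k d0 f).keys.Nodup := by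
  rw [PySem.Dict.keys_modify]
  exact PySem.Dict.nodup_keys_insert _ _ _ h
lemma pvBuild_nodup (edges : List (List Int)) : (pvBuild edges).1.keys.Nodup := by
  unfold pvBuild
  have : ∀ (es : List (List Int)) (st : PySem.Dict Int (List Int) × PySem.Dict Int Int),
      st.1.keys.Nodup →
      (es.foldl (fun st e =>
        let a := PySem.List.pyGetD e 0 0
        let b := PySem.List.pyGetD e 1 0
        let oe := ((st.1.setdefault a []).setdefault b []).modify a [] (fun l => l ++ [b])
        let dg := st.2.insert a (st.2.getD a 0 + 1)
        (oe, dg.insert b (dg.getD b 0 - 1))) st).1.keys.Nodup := by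
    intro es
    induction es with
    | nil => intro st h; simpa using h
    | cons e rest ih =>
      intro st h
      simp only [List.foldl_cons]
      exact ih _ (pv_nodup_modify _ _ _ _ (pv_nodup_setdefault _ _ _ (pv_nodup_setdefault _ _ _ h)))
  exact this edges _ (by simp [PySem.Dict.keys])
lemma pvSortAll_nodup (oe : PySem.Dict Int (List Int)) (rev : Bool)
    (h : oe.keys.Nodup) : (pvSortAll oe rev).keys.Nodup := by
  unfold pvSortAll
  have : ∀ (ks : List Int) (d : PySem.Dict Int (List Int)), d.keys.Nodup →
      (ks.foldl (fun d v => d.modify v [] (fun l => PySem.List.sorted l id (!rev))) d).keys.Nodup := by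
    intro ks
    induction ks with
    | nil => intro d h; simpa using h
    | cons k rest ih => intro d h; simp only [List.foldl_cons]; exact ih _ (pv_nodup_modify _ _ _ _ h)
  exact this _ _ h

lemma pv_size_aux : ∀ (its : List (Int × List Int)) (k : Int) (l w : List Int),
    (its.map Prod.fst).Nodup →
    (its.find? (fun p => p.1 == k)).map Prod.snd = some l →
    ((its.map (fun p => if p.1 == k then (k, w) else p)).map (fun p => p.2.length)).sum + l.length
      = (its.map (fun p => p.2.length)).sum + w.length := by
  intro its
  induction its with
  | nil => intro k l w _ h; simp at h
  | cons p rest ih =>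
    intro k l w hnd h
    simp only [List.map_cons, List.nodup_cons] at hnd
    by_cases hpk : (p.1 == k) = true
    · simp only [List.find?_cons, hpk, Option.map_some] at h
      have hk : p.1 = k := by exact_mod_cast eq_of_beq hpk
      have hrest : rest.map (fun q => if q.1 == k then ((k, w) : Int × List Int) else q) = rest := by
        conv_rhs => rw [← List.map_id rest]
        refine List.map_congr_left (fun q hq => ?_)
        have : (q.1 == k) = false := by
          refine beq_false_of_ne (fun hc => hnd.1 ?_)
          exact hk ▸ hc ▸ List.mem_map.mpr ⟨q, hq, rfl⟩
        simp [this]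
      simp only [List.map_cons, hpk, if_true, hrest, List.sum_cons]
      have : p.2.length = l.length := by rw [Option.some_inj.mp h]
      omega
    · have hpk' : (p.1 == k) = false := by simpa using hpk
      simp only [List.find?_cons, hpk', cond_false] at h
      have := ih k l w hnd.2 h
      simp only [List.map_cons, hpk', Bool.false_eq_true, if_false, List.sum_cons]
      omega
lemma pv_size_insert (d : PySem.Dict Int (List Int)) (k : Int) (l w : List Int)
    (h : d.get? k = some l) (hn : d.keys.Nodup) :
    pvSize (d.insert k w) + l.length = pvSize d + w.length := by
  have hc : d.contains k = true := by
    rw [PySem.Dict.contains_eq_isSome_get?, h]; rfl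
  have hfind : (d.items.find? (fun p => p.1 == k)).map Prod.snd = some l := by
    simpa [PySem.Dict.get?] using h
  simp only [pvSize, PySem.Dict.insert, hc, if_true]
  exact pv_size_aux d.items k l w (by simpa [PySem.Dict.keys] using hn) hfind
lemma pv_get?_of_getD_ne (d : PySem.Dict Int (List Int)) (v : Int) (l : List Int)
    (h : d.getD v [] = l) (hl : l ≠ []) : d.get? v = some l := by
  cases hg : d.get? v with
  | none => simp [PySem.Dict.getD, hg] at h; exact absurd h.symm (by simpa using hl)
  | some a => simp [PySem.Dict.getD, hg] at h; rw [h]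

lemma pv_pop_facts (oe : PySem.Dict Int (List Int)) (v : Int) (hnd : oe.keys.Nodup)
    (hl : oe.getD v [] ≠ []) :
    pvSize (oe.insert v (oe.getD v []).dropLast) + 1 = pvSize oe
      ∧ (oe.insert v (oe.getD v []).dropLast).keys = oe.keys := by
  have hget : oe.get? v = some (oe.getD v []) := pv_get?_of_getD_ne _ _ _ rfl hl
  have hlen : 1 ≤ (oe.getD v []).length := List.length_pos_iff.mpr hl
  have hsz := pv_size_insert oe v (oe.getD v []) (oe.getD v []).dropLast hget hnd
  have hc : oe.contains v = true := by rw [PySem.Dict.contains_eq_isSome_get?, hget]; rfl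
  refine ⟨?_, PySem.Dict.keys_insert_of_contains oe _ hc⟩
  rw [List.length_dropLast] at hsz
  omega

lemma pvDfsA_counts : ∀ (f : Nat) (oe : PySem.Dict Int (List Int)) (res : List Int) (v : Int)
    (oe' : PySem.Dict Int (List Int)) (res' : List Int), oe.keys.Nodup →
    pvDfsA f oe res v = some (oe', res') →
    res'.length + pvSize oe' = res.length + pvSize oe + 1 ∧ pvSize oe' ≤ pvSize oe ∧ oe'.keys = oe.keys := by
  intro f
  induction f with
  | zero => intro oe res v oe' res' _ h; simp [pvDfsA] at h
  | succ f ih =>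
    intro oe res v oe' res' hnd h
    simp only [pvDfsA] at h
    by_cases hl : oe.getD v [] = []
    · rw [dif_pos hl] at h
      obtain ⟨h1, h2⟩ : oe = oe' ∧ res ++ [v] = res' := by
        simpa using h
      subst h1; subst h2
      refine ⟨?_, le_refl _, rfl⟩
      simp only [List.length_append, List.length_cons, List.length_nil]
      omega
    · rw [dif_neg hl] at h
      obtain ⟨hsz, hkeys⟩ := pv_pop_facts oe v hnd hl
      have hnd1 : (oe.insert v (oe.getD v []).dropLast).keys.Nodup := hkeys ▸ hnd
      cases hrec : pvDfsA f (oe.insert v (oe.getD v []).dropLast) res ((oe.getD v []).getLast hl) with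
      | none => rw [hrec] at h; simp at h
      | some p =>
        obtain ⟨oe2, res2⟩ := p
        rw [hrec] at h
        have ih1 := ih _ _ _ _ _ hnd1 hrec
        have hnd2 : oe2.keys.Nodup := ih1.2.2 ▸ hnd1
        have ih2 := ih _ _ _ _ _ hnd2 h
        refine ⟨by omega, by omega, ?_⟩
        rw [ih2.2.2, ih1.2.2, hkeys]

lemma pvDfsA_isSome : ∀ (f : Nat) (oe : PySem.Dict Int (List Int)) (res : List Int) (v : Int),
    oe.keys.Nodup → 2 * pvSize oe < f → (pvDfsA f oe res v).isSome := by
  intro f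
  induction f with
  | zero => intro oe res v _ hf; omega
  | succ f ih =>
    intro oe res v hnd hf
    simp only [pvDfsA]
    by_cases hl : oe.getD v [] = []
    · rw [dif_pos hl]; rfl
    · rw [dif_neg hl]
      obtain ⟨hsz, hkeys⟩ := pv_pop_facts oe v hnd hl
      have hnd1 : (oe.insert v (oe.getD v []).dropLast).keys.Nodup := hkeys ▸ hnd
      have h1 := ih (oe.insert v (oe.getD v []).dropLast) res ((oe.getD v []).getLast hl) hnd1 (by omega)
      cases hrec : pvDfsA f (oe.insert v (oe.getD v []).dropLast) res ((oe.getD v []).getLast hl) with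
      | none => rw [hrec] at h1; simp at h1
      | some p =>
        obtain ⟨oe2, res2⟩ := p
        have ih1 := pvDfsA_counts f _ _ _ _ _ hnd1 hrec
        have hnd2 : oe2.keys.Nodup := ih1.2.2 ▸ hnd1
        simpa using ih oe2 res2 v hnd2 (by omega)

lemma pvLoopB_mono : ∀ (f g : Nat) (oe : PySem.Dict Int (List Int)) (st res r : List Int),
    pvLoopB f oe st res = some r → f ≤ g → pvLoopB g oe st res = some r := by
  intro f
  induction f with
  | zero =>
    intro g oe st res r h _
    cases st with
    | nil => cases g <;> simpa using h
    | cons v tl => simp [pvLoopB] at h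
  | succ f ih =>
    intro g oe st res r h hfg
    cases st with
    | nil => cases g <;> simpa using h
    | cons v tl =>
      obtain ⟨g', rfl⟩ : ∃ g', g = g' + 1 := ⟨g - 1, by omega⟩
      simp only [pvLoopB] at h ⊢
      by_cases hl : oe.getD v [] = []
      · rw [dif_pos hl] at h ⊢; exact ih g' _ _ _ _ h (by omega)
      · rw [dif_neg hl] at h ⊢; exact ih g' _ _ _ _ h (by omega)
lemma pv_bridge : ∀ (f : Nat) (oe : PySem.Dict Int (List Int)) (res : List Int) (v : Int)
    (oe' : PySem.Dict Int (List Int)) (res' : List Int), oe.keys.Nodup →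
    pvDfsA f oe res v = some (oe', res') →
    ∀ (g : Nat) (stack : List Int),
      pvLoopB (g + (res'.length - res.length) + (pvSize oe - pvSize oe')) oe (v :: stack) res
        = pvLoopB g oe' stack res' := by
  intro f
  induction f with
  | zero => intro oe res v oe' res' _ h; simp [pvDfsA] at h
  | succ f ih =>
    intro oe res v oe' res' hnd h g stack
    simp only [pvDfsA] at h
    by_cases hl : oe.getD v [] = []
    · rw [dif_pos hl] at h
      obtain ⟨h1, h2⟩ : oe = oe' ∧ res ++ [v] = res' := by simpa using h
      subst h1; subst h2
      have hfuel : g + ((res ++ [v]).length - res.length) + (pvSize oe - pvSize oe) = g + 1 := by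
        simp only [List.length_append, List.length_cons, List.length_nil]; omega
      rw [hfuel]
      simp only [pvLoopB]
      rw [dif_pos hl]
    · rw [dif_neg hl] at h
      obtain ⟨hsz, hkeys⟩ := pv_pop_facts oe v hnd hl
      have hnd1 : (oe.insert v (oe.getD v []).dropLast).keys.Nodup := hkeys ▸ hnd
      cases hrec : pvDfsA f (oe.insert v (oe.getD v []).dropLast) res ((oe.getD v []).getLast hl) with
      | none => rw [hrec] at h; simp at h
      | some p =>
        obtain ⟨oe2, res2⟩ := p
        rw [hrec] at h
        have c1 := pvDfsA_counts f _ _ _ _ _ hnd1 hrec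
        have hnd2 : oe2.keys.Nodup := c1.2.2 ▸ hnd1
        have c2 := pvDfsA_counts f _ _ _ _ _ hnd2 h
        have ih1 := ih _ _ _ _ _ hnd1 hrec (g + (res'.length - res2.length) + (pvSize oe2 - pvSize oe')) (v :: stack)
        have ih2 := ih _ _ _ _ _ hnd2 h g stack
        have hfuel : g + (res'.length - res.length) + (pvSize oe - pvSize oe')
            = (g + (res'.length - res2.length) + (pvSize oe2 - pvSize oe')
               + (res2.length - res.length)
               + (pvSize (oe.insert v (oe.getD v []).dropLast) - pvSize oe2)) + 1 := by
          omega
        rw [hfuel]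
        simp only [pvLoopB]
        rw [dif_neg hl]
        rw [ih1, ih2]

lemma pvRun_eq (edges : List (List Int)) (oe : PySem.Dict Int (List Int)) (s : Int)
    (h : oe.keys.Nodup) : pvRunA edges oe s = pvRunB edges oe s := by
  unfold pvRunA pvRunB
  have hsome := pvDfsA_isSome (2 * pvSize oe + 1) oe [] s h (by omega)
  cases hrec : pvDfsA (2 * pvSize oe + 1) oe [] s with
  | none => rw [hrec] at hsome; simp at hsome
  | some p =>
    obtain ⟨oe', res'⟩ := p
    have c := pvDfsA_counts _ _ _ _ _ _ h hrec
    have hb := pv_bridge _ _ _ _ _ _ h hrec 0 []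
    have hloop0 : pvLoopB 0 oe' [] res' = some res' := rfl
    rw [hloop0] at hb
    have hle : 0 + (res'.length - ([] : List Int).length) + (pvSize oe - pvSize oe')
        ≤ 2 * pvSize oe + 1 := by
      simp only [List.length_nil] at *
      omega
    have hmono := pvLoopB_mono _ _ _ _ _ _ hb hle
    rw [hmono]
lemma pvChk_none_iff : ∀ (l : List (Int × Int)) (nz : PySem.Dict Int Int),
    pvChk l nz = none ↔
      ¬((∀ p ∈ l, p.2 = 0 ∨ p.2 = 1 ∨ p.2 = -1)
        ∧ l.countP (fun p => p.2 == 1) + (if nz.contains 1 then 1 else 0) ≤ 1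
        ∧ l.countP (fun p => p.2 == (-1 : Int)) + (if nz.contains (-1) then 1 else 0) ≤ 1) := by
  intro l
  induction l with
  | nil =>
    intro nz
    constructor
    · intro h; exact absurd h (by simp [pvChk])
    · intro hn
      exfalso; apply hn
      refine ⟨by simp, ?_, ?_⟩ <;> simp <;> split_ifs <;> omega
  | cons head rest ih =>
    obtain ⟨v, d⟩ := head
    intro nz
    simp only [pvChk]
    by_cases hd0 : d = 0
    · subst hd0
      rw [if_pos rfl, ih nz]
      apply not_congr
      apply and_congr
      · simp
      apply and_congr <;> · simp [List.countP_cons]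
    · rw [if_neg hd0]
      by_cases habs : d.natAbs ≠ 1 ∨ nz.contains d
      · rw [if_pos habs]
        simp only [true_iff]
        rintro ⟨hall, h1, hm⟩
        have hd := hall (v, d) (List.mem_cons_self)
        simp only at hd
        rcases habs with habs | hcon
        · rcases hd with h | h | h
          · exact hd0 h
          · exact habs (by rw [h]; rfl)
          · exact habs (by rw [h]; rfl)
        · rcases hd with h | h | h
          · exact hd0 h
          · subst h
            rw [hcon] at h1
            simp [List.countP_cons] at h1
          · subst h
            rw [hcon] at hm
            simp [List.countP_cons] at hm
      · rw [if_neg habs]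
        push_neg at habs
        obtain ⟨habs1, hcon⟩ := habs
        have hcon' : nz.contains d = false := by simpa using hcon
        have hd : d = 1 ∨ d = -1 := by omega
        rcases hd with rfl | rfl
        · rw [ih (nz.insert 1 v)]
          apply not_congr
          apply and_congr
          · simp
          have e3 : (nz.insert 1 v).contains 1 = true := by
            rw [PySem.Dict.contains_insert]; simp
          have e4 : (nz.insert 1 v).contains (-1) = nz.contains (-1) := by
            rw [PySem.Dict.contains_insert]; simp
          rw [e3, e4, hcon']
          apply and_congr <;> · simp [List.countP_cons]
        · rw [ih (nz.insert (-1) v)]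
          apply not_congr
          apply and_congr
          · simp
          have e3 : (nz.insert (-1) v).contains (-1) = true := by
            rw [PySem.Dict.contains_insert]; simp
          have e4 : (nz.insert (-1) v).contains 1 = nz.contains 1 := by
            rw [PySem.Dict.contains_insert]; simp
          rw [e3, e4, hcon']
          apply and_congr <;> · simp [List.countP_cons]
lemma pv_items_insert_ne_nil (nz : PySem.Dict Int Int) (k : Int) (v : Int) :
    (nz.insert k v).items.isEmpty = false := by
  simp only [PySem.Dict.insert]
  by_cases hc : nz.contains k = true
  · rw [if_pos hc]
    cases hits : nz.items with
    | nil => simp [PySem.Dict.contains, hits] at hc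
    | cons a b => simp
  · rw [if_neg hc]; simp

lemma pvChk_some_empty : ∀ (l : List (Int × Int)) (nz nz' : PySem.Dict Int Int),
    pvChk l nz = some nz' →
    nz'.items.isEmpty = (nz.items.isEmpty && l.all (fun p => p.2 == 0)) := by
  intro l
  induction l with
  | nil =>
    intro nz nz' h
    have hnn : nz = nz' := by simpa [pvChk] using h
    subst hnn
    simp
  | cons head rest ih =>
    obtain ⟨v, d⟩ := head
    intro nz nz' h
    simp only [pvChk] at h
    by_cases hd0 : d = 0
    · subst hd0
      rw [if_pos rfl] at h
      rw [ih _ _ h]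
      simp
    · rw [if_neg hd0] at h
      by_cases habs : d.natAbs ≠ 1 ∨ nz.contains d
      · rw [if_pos habs] at h; simp at h
      · rw [if_neg habs] at h
        rw [ih _ _ h, pv_items_insert_ne_nil]
        simp [hd0]

lemma pvChk_some_get1 : ∀ (l : List (Int × Int)) (nz nz' : PySem.Dict Int Int),
    pvChk l nz = some nz' →
    nz'.get? 1 = (((l.filter (fun p => p.2 == 1)).map Prod.fst).head?).or (nz.get? 1) := by
  intro l
  induction l with
  | nil =>
    intro nz nz' h
    have hnn : nz = nz' := by simpa [pvChk] using h
    subst hnn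
    simp
  | cons head rest ih =>
    obtain ⟨v, d⟩ := head
    intro nz nz' h
    simp only [pvChk] at h
    by_cases hd0 : d = 0
    · subst hd0
      rw [if_pos rfl] at h
      rw [ih _ _ h]
      simp
    · rw [if_neg hd0] at h
      by_cases habs : d.natAbs ≠ 1 ∨ nz.contains d
      · rw [if_pos habs] at h; simp at h
      · rw [if_neg habs] at h
        push_neg at habs
        obtain ⟨habs1, hcon⟩ := habs
        have hcon' : nz.contains d = false := by simpa using hcon
        have hd : d = 1 ∨ d = -1 := by omega
        rcases hd with rfl | rfl
        · -- head has degree 1: it is the unique +1 entry (rest has none, else pvChk = none)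
          have hrest : rest.countP (fun p => p.2 == (1 : Int)) = 0 := by
            by_contra hne
            have : pvChk rest (nz.insert 1 v) = none := by
              rw [pvChk_none_iff]
              intro ⟨_, h1, _⟩
              have : (nz.insert 1 v).contains 1 = true := by
                rw [PySem.Dict.contains_insert]; simp
              rw [this, if_pos rfl] at h1
              omega
            rw [this] at h; simp at h
          have hfil : rest.filter (fun p => p.2 == (1 : Int)) = [] := by
            rw [← List.length_eq_zero_iff, ← List.countP_eq_length_filter]
            exact hrest
          rw [ih _ _ h, hfil]
          simp [PySem.Dict.get?_insert_self]
        · rw [ih _ _ h]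
          have e : (nz.insert (-1) v).get? 1 = nz.get? 1 :=
            PySem.Dict.get?_insert_of_ne _ _ (by norm_num)
          rw [e]
          simp

lemma pv_main (edges : List (List Int)) (start : Option Int) (sort reverse : Bool) :
    hierholzerAlgorithm edges start sort reverse = hierholzerAlgorithm_alt edges start sort reverse := by
  cases start with
  | none => rfl
  | some s =>
    simp only [hierholzerAlgorithm, hierholzerAlgorithm_alt]
    by_cases hc : (pvBuild edges).2.contains s = false
    · rw [if_pos hc, if_pos hc]
    · rw [if_neg hc, if_neg hc]
      -- the final runs agree
      have hnd0 := pvBuild_nodup edges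
      have hndF : (if sort = true then pvSortAll (pvBuild edges).1 reverse else (pvBuild edges).1).keys.Nodup := by
        cases sort
        · simpa using hnd0
        · simpa using pvSortAll_nodup _ _ hnd0
      have hrun := pvRun_eq edges _ s hndF
      generalize hOE : (if sort = true then pvSortAll (pvBuild edges).1 reverse else (pvBuild edges).1) = OE at hrun ⊢
      -- abbreviations
      have hmkc : ∀ x : Int, (PySem.Dict.mk ([] : List (Int × Int))).contains x = false := fun _ => rfl
      have hplen : (List.map Prod.fst (List.filter (fun p => p.2 == (1:Int)) (pvBuild edges).2.items)).length
          = (pvBuild edges).2.items.countP (fun p => p.2 == (1:Int)) := by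
        rw [List.length_map, ← List.countP_eq_length_filter]
      have hmlen : (List.map Prod.fst (List.filter (fun p => p.2 == (-1:Int)) (pvBuild edges).2.items)).length
          = (pvBuild edges).2.items.countP (fun p => p.2 == (-1:Int)) := by
        rw [List.length_map, ← List.countP_eq_length_filter]
      cases hchk : pvChk (pvBuild edges).2.items (PySem.Dict.mk []) with
      | none =>
        dsimp only
        rw [pvChk_none_iff] at hchk
        simp only [hmkc, Bool.false_eq_true, if_false, Nat.add_zero] at hchk
        -- show B's first guard fires
        have hb1 : ((((pvBuild edges).2.values.any fun d => decide (1 < d.natAbs))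
            || decide (1 < (List.map Prod.fst (List.filter (fun p => p.2 == (1:Int)) (pvBuild edges).2.items)).length)
            || decide (1 < (List.map Prod.fst (List.filter (fun p => p.2 == (-1:Int)) (pvBuild edges).2.items)).length))) = true := by
          by_cases hany : ((pvBuild edges).2.values.any fun d => decide (1 < d.natAbs)) = true
          · simp [hany]
          · have hany' : ∀ x ∈ (pvBuild edges).2.values, x.natAbs ≤ 1 := by simpa using hany
            have hok : ∀ p ∈ (pvBuild edges).2.items, p.2 = 0 ∨ p.2 = 1 ∨ p.2 = -1 := by
              intro p hp
              have := hany' p.2 (List.mem_map.mpr ⟨p, hp, rfl⟩)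
              omega
            have : ¬ ((pvBuild edges).2.items.countP (fun p => p.2 == (1:Int)) ≤ 1
                ∧ (pvBuild edges).2.items.countP (fun p => p.2 == (-1:Int)) ≤ 1) := by
              intro ⟨a, b⟩; exact hchk ⟨hok, a, b⟩
            rw [hplen, hmlen]
            rcases Nat.lt_or_ge 1 ((pvBuild edges).2.items.countP (fun p => p.2 == (1:Int))) with h | h
            · simp [h]
            · rcases Nat.lt_or_ge 1 ((pvBuild edges).2.items.countP (fun p => p.2 == (-1:Int))) with h2 | h2
              · simp [h2]
              · exact absurd ⟨h, h2⟩ this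
        rw [if_pos hb1]
      | some nz =>
        dsimp only
        have hn : ¬ (pvChk (pvBuild edges).2.items (PySem.Dict.mk []) = none) := by rw [hchk]; simp
        rw [pvChk_none_iff, not_not] at hn
        simp only [hmkc, Bool.false_eq_true, if_false, Nat.add_zero] at hn
        obtain ⟨hok, h1, hm⟩ := hn
        have hb1 : ((((pvBuild edges).2.values.any fun d => decide (1 < d.natAbs))
            || decide (1 < (List.map Prod.fst (List.filter (fun p => p.2 == (1:Int)) (pvBuild edges).2.items)).length)
            || decide (1 < (List.map Prod.fst (List.filter (fun p => p.2 == (-1:Int)) (pvBuild edges).2.items)).length))) = false := by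
          have hany : ((pvBuild edges).2.values.any fun d => decide (1 < d.natAbs)) = false := by
            apply List.any_eq_false.mpr
            intro d hd
            obtain ⟨p, hp, rfl⟩ := List.mem_map.mp hd
            have := hok p hp
            simp
            omega
          rw [hany, hplen, hmlen]
          simp
          omega
        rw [hb1]
        simp only [Bool.false_eq_true, if_false]
        have hemp := pvChk_some_empty _ _ _ hchk
        simp only [List.isEmpty_nil, Bool.true_and] at hemp
        have hget := pvChk_some_get1 _ _ _ hchk
        have hmkget : (PySem.Dict.mk ([] : List (Int × Int))).get? (1:Int) = none := rfl
        rw [hmkget, Option.or_none] at hget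
        by_cases hall : (pvBuild edges).2.items.all (fun p => p.2 == 0) = true
        · -- no unbalanced vertex: both go straight to the run
          rw [hall] at hemp
          rw [hemp]
          simp only [if_neg (by simp : ¬ (true = false))]
          have hfil1 : List.filter (fun p => p.2 == (1:Int)) (pvBuild edges).2.items = [] := by
            apply List.filter_eq_nil_iff.mpr
            intro p hp
            have := List.all_eq_true.mp hall p hp
            simp at this ⊢
            omega
          have hfilm : List.filter (fun p => p.2 == (-1:Int)) (pvBuild edges).2.items = [] := by
            apply List.filter_eq_nil_iff.mpr
            intro p hp
            have := List.all_eq_true.mp hall p hp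
            simp at this ⊢
            omega
          rw [hfil1, hfilm]
          simp only [List.map_nil, List.isEmpty_nil, Bool.not_true, Bool.or_self, Bool.false_and,
            Bool.false_eq_true, if_false]
          exact hrun
        · rw [eq_false_of_ne_true hall] at hemp
          rw [hemp]
          simp only [reduceIte]
          have hexn : ∃ p ∈ (pvBuild edges).2.items, ¬ ((p.2 == 0) = true) := by
            have := eq_false_of_ne_true hall
            rw [List.all_eq_false] at this
            exact this
          cases hfil : List.filter (fun p => p.2 == (1:Int)) (pvBuild edges).2.items with
          | nil =>
            rw [hfil] at hget
            simp only [List.map_nil, List.head?_nil] at hget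
            rw [hget]
            have hmne : List.filter (fun p => p.2 == (-1:Int)) (pvBuild edges).2.items ≠ [] := by
              obtain ⟨p, hp, hpz⟩ := hexn
              have hpz' : p.2 ≠ 0 := by simpa using hpz
              rcases hok p hp with h0 | h1' | hm1
              · exact absurd h0 hpz'
              · exfalso
                have : p ∈ List.filter (fun p => p.2 == (1:Int)) (pvBuild edges).2.items :=
                  List.mem_filter.mpr ⟨hp, by simp [h1']⟩
                rw [hfil] at this
                simp at this
              · intro hnil
                have : p ∈ List.filter (fun p => p.2 == (-1:Int)) (pvBuild edges).2.items :=
                  List.mem_filter.mpr ⟨hp, by simp [hm1]⟩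
                rw [hnil] at this
                simp at this
            have hne : (List.map Prod.fst (List.filter (fun p => p.2 == (-1:Int)) (pvBuild edges).2.items)).isEmpty = false := by
              rw [List.isEmpty_eq_false_iff]
              simpa using hmne
            split_ifs with hB
            · rfl
            · exfalso
              apply hB
              rw [hne]
              simp
          | cons a tl =>
            have hlen1 : (a :: tl).length ≤ 1 := by
              rw [← hfil, ← List.countP_eq_length_filter]
              exact h1
            have htl : tl = [] := by
              rcases tl with _ | ⟨x, xs⟩
              · rfl
              · exfalso; simp at hlen1
            subst htl
            rw [hfil] at hget
            simp only [List.map_cons, List.map_nil, List.head?_cons] at hget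
            rw [hget]
            by_cases has : a.1 = s
            · simp only [List.map_cons, List.map_nil]
              rw [if_neg (by simpa using has)]
              split_ifs with hB
              · exfalso
                simp [PySem.List.pyGetD_zero_cons, has] at hB
              · exact hrun
            · simp only [List.map_cons, List.map_nil]
              rw [if_pos (by simpa using has)]
              split_ifs with hB
              · rfl
              · exfalso
                apply hB
                simp [PySem.List.pyGetD_zero_cons, has]

-- ===== VERDICT (by name: the statement is the Claim_ definition above) =====
theorem hierholzerAlgorithm_spec : Claim_equal_hierholzerAlgorithm := by
  intro edges start sort reverse _dom _pre
  unfold Spec_hierholzerAlgorithm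
  exact pv_main edges start sort reverse
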